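-- pv_equiv track=rewrite | github.com/psylch/zlib-search-skill | skills/book-tools/scripts/book.py | _parse_annas_search_output
-- ===== SOURCE A (Python) =====
-- def _parse_annas_search_output(text: str) -> list[dict]:
--     """Parse annas-mcp search plain-text output into structured dicts."""
--     books = []
--     current = {}
--
--     for line in text.strip().splitlines():
--         line = line.strip()
--         if not line:
--             if current:
--                 books.append(current)
--                 current = {}
--             continue
--
--         if line.startswith("Title:"):
--             if current:
--                 books.append(current)
--             current = {"source": "annas", "title": line[6:].strip()}
--         elif line.startswith("Authors:"):
--             current["author"] = line[8:].strip()
--         elif line.startswith("Publisher:"):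
--             current["publisher"] = line[10:].strip()
--         elif line.startswith("Language:"):
--             current["language"] = line[9:].strip()
--         elif line.startswith("Format:"):
--             current["extension"] = line[7:].strip()
--         elif line.startswith("Size:"):
--             current["filesize"] = line[5:].strip()
--         elif line.startswith("URL:"):
--             current["url"] = line[4:].strip()
--         elif line.startswith("Hash:"):
--             current["hash"] = line[5:].strip()
--
--     if current:
--         books.append(current)
--     return books
-- ===== SOURCE B (Python) =====
-- _PREFIXES = [
--     ("Title:", "title"),
--     ("Authors:", "author"),
--     ("Publisher:", "publisher"),
--     ("Language:", "language"),
--     ("Format:", "extension"),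
--     ("Size:", "filesize"),
--     ("URL:", "url"),
--     ("Hash:", "hash"),
-- ]
--
--
-- def _parse_annas_search_output(text: str) -> list[dict]:
--     """Parse annas-mcp search plain-text output into structured dicts."""
--     # Stage 1: classify every line into an event: None = blank, (field, value) = a
--     # recognized field line; unrecognized non-blank lines produce no event.
--     events = []
--     for raw in text.strip().splitlines():
--         line = raw.strip()
--         if not line:
--             events.append(None)
--         else:
--             for prefix, field in _PREFIXES:
--                 if line.startswith(prefix):
--                     events.append((field, line[len(prefix):].strip()))
--                     break
--
--     # Stage 2: group events into runs of field events; a blank ends a run, a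
--     # title event ends the run in progress and starts a new one.
--     runs = []
--     run = []
--     for ev in events:
--         if ev is None:
--             if run:
--                 runs.append(run)
--                 run = []
--         else:
--             if ev[0] == "title" and run:
--                 runs.append(run)
--                 run = []
--             run.append(ev)
--     if run:
--         runs.append(run)
--
--     # Stage 3: build one dict per run.
--     books = []
--     for run in runs:
--         book = {}
--         for field, value in run:
--             if field == "title":
--                 book = {"source": "annas", "title": value}
--             else:
--                 book[field] = value
--         books.append(book)
--     return books
-- ===== Notes on version B (the rewrite author's own statement) =====
-- stated objective: alternative
-- what changed: Replaces A's one-pass state machine (dict accumulator mutated while scanning, flushed inline) by three staged passes: classify lines into events, group events into runs delimited by blanks and Title events, then build each record's dict from its run.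
import Mathlib
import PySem

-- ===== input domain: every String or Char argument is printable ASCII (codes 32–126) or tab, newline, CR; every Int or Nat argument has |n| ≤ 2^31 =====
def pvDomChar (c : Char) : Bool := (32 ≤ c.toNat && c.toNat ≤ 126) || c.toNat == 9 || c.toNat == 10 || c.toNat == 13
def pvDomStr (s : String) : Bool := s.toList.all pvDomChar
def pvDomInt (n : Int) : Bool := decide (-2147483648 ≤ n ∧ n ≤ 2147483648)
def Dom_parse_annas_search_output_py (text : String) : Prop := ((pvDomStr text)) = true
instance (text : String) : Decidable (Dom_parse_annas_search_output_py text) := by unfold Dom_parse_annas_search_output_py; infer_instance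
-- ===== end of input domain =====

-- B restructures A's one-pass state machine into three staged passes (classify lines into
-- events, group events into runs, build one dict per run); objective: alternative
-- decomposition, same return value proved equal on all inputs.

-- ===== PORT A =====
-- loop body of A: state = (books, current)
def pvStepA (st : List (PySem.Dict String String) × PySem.Dict String String) (raw : String) :
    List (PySem.Dict String String) × PySem.Dict String String :=
  let line := PySem.Str.strip raw
  if line = "" then
    (if st.2.items ≠ [] then (st.1 ++ [st.2], PySem.Dict.empty) else st)
  else if PySem.Str.startswith line "Title:" then
    ((if st.2.items ≠ [] then st.1 ++ [st.2] else st.1),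
     (PySem.Dict.empty.insert "source" "annas").insert "title"
       (PySem.Str.strip (PySem.Str.slice line (some 6) none)))
  else if PySem.Str.startswith line "Authors:" then
    (st.1, st.2.insert "author" (PySem.Str.strip (PySem.Str.slice line (some 8) none)))
  else if PySem.Str.startswith line "Publisher:" then
    (st.1, st.2.insert "publisher" (PySem.Str.strip (PySem.Str.slice line (some 10) none)))
  else if PySem.Str.startswith line "Language:" then
    (st.1, st.2.insert "language" (PySem.Str.strip (PySem.Str.slice line (some 9) none)))
  else if PySem.Str.startswith line "Format:" then
    (st.1, st.2.insert "extension" (PySem.Str.strip (PySem.Str.slice line (some 7) none)))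
  else if PySem.Str.startswith line "Size:" then
    (st.1, st.2.insert "filesize" (PySem.Str.strip (PySem.Str.slice line (some 5) none)))
  else if PySem.Str.startswith line "URL:" then
    (st.1, st.2.insert "url" (PySem.Str.strip (PySem.Str.slice line (some 4) none)))
  else if PySem.Str.startswith line "Hash:" then
    (st.1, st.2.insert "hash" (PySem.Str.strip (PySem.Str.slice line (some 5) none)))
  else st

def parse_annas_search_output_py (text : String) : List (List (String × String)) :=
  let st := (PySem.Str.splitlines (PySem.Str.strip text)).foldl pvStepA ([], PySem.Dict.empty)
  (if st.2.items ≠ [] then st.1 ++ [st.2] else st.1).map PySem.Dict.items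

-- ===== PORT B =====
def pvPrefixes : List (String × String) :=
  [("Title:", "title"), ("Authors:", "author"), ("Publisher:", "publisher"),
   ("Language:", "language"), ("Format:", "extension"), ("Size:", "filesize"),
   ("URL:", "url"), ("Hash:", "hash")]

-- Source B's inner 'for prefix, field in _PREFIXES: … break' first-match search
def pvFirstMatch : List (String × String) → String → Option (String × String)
  | [], _ => none
  | (p, f) :: rest, line =>
    if PySem.Str.startswith line p then some (p, f) else pvFirstMatch rest line

-- stage 1, per line: some none = blank marker, some (some e) = field event, none = no event
def pvClassify (raw : String) : Option (Option (String × String)) :=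
  let line := PySem.Str.strip raw
  if line = "" then some none
  else
    match pvFirstMatch pvPrefixes line with
    | some (p, f) =>
        some (some (f, PySem.Str.strip (PySem.Str.slice line (some (PySem.Str.len p)) none)))
    | none => none

def pvEvents (text : String) : List (Option (String × String)) :=
  (PySem.Str.splitlines (PySem.Str.strip text)).foldl
    (fun acc raw =>
      match pvClassify raw with
      | some ev => acc ++ [ev]
      | none => acc) []

-- stage 2: group events into runs; state = (runs, run)
def pvGroupStep (st : List (List (String × String)) × List (String × String))
    (ev : Option (String × String)) :
    List (List (String × String)) × List (String × String) :=
  match ev with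
  | none => if st.2 ≠ [] then (st.1 ++ [st.2], []) else st
  | some e =>
    if e.1 = "title" ∧ st.2 ≠ [] then (st.1 ++ [st.2], [e]) else (st.1, st.2 ++ [e])

-- stage 3: build one dict from a run
def pvBuildStep (d : PySem.Dict String String) (e : String × String) : PySem.Dict String String :=
  if e.1 = "title" then (PySem.Dict.empty.insert "source" "annas").insert "title" e.2
  else d.insert e.1 e.2

def pvBuild (run : List (String × String)) : PySem.Dict String String :=
  run.foldl pvBuildStep PySem.Dict.empty

def parse_annas_search_output_py_alt (text : String) : List (List (String × String)) :=
  let st := (pvEvents text).foldl pvGroupStep ([], [])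
  ((if st.2 ≠ [] then st.1 ++ [st.2] else st.1).map pvBuild).map PySem.Dict.items

-- ===== PRECONDITION & SPEC =====
def Spec_parse_annas_search_output_py (text : String) (out : List (List (String × String))) : Prop := out = parse_annas_search_output_py_alt text
instance (text : String) (out : List (List (String × String))) : Decidable (Spec_parse_annas_search_output_py text out) := by unfold Spec_parse_annas_search_output_py; infer_instance

-- ===== CLAIM =====
def Claim_equal_parse_annas_search_output_py : Prop := ∀ (text : String), Dom_parse_annas_search_output_py text → Spec_parse_annas_search_output_py text (parse_annas_search_output_py text)

-- ===== LEMMAS AND PROOFS =====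

theorem pvInsertNonempty (d : PySem.Dict String String) (k v : String) :
    (d.insert k v).items ≠ [] := by
  rw [PySem.Dict.items_insert]
  split
  · next h =>
    intro hc
    rcases d with ⟨l⟩
    simp at hc
    subst hc
    simp at h
  · simp

theorem pvBuildStepNonempty (d : PySem.Dict String String) (e : String × String) :
    (pvBuildStep d e).items ≠ [] := by
  unfold pvBuildStep
  split
  · exact pvInsertNonempty _ _ _
  · exact pvInsertNonempty _ _ _

theorem pvFoldlBuildNonempty (run : List (String × String)) (d : PySem.Dict String String)
    (hd : d.items ≠ []) : (run.foldl pvBuildStep d).items ≠ [] := by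
  induction run generalizing d with
  | nil => exact hd
  | cons e rest ih => exact ih _ (pvBuildStepNonempty d e)

theorem pvBuildNonemptyIff (run : List (String × String)) :
    (pvBuild run).items ≠ [] ↔ run ≠ [] := by
  constructor
  · intro h he; subst he; exact h rfl
  · intro h
    cases run with
    | nil => exact absurd rfl h
    | cons e rest => exact pvFoldlBuildNonempty rest _ (pvBuildStepNonempty _ e)

theorem pvBuildAppend (run : List (String × String)) (e : String × String) :
    pvBuild (run ++ [e]) = pvBuildStep (pvBuild run) e := by
  simp [pvBuild, List.foldl_append]

-- per-line correspondence: A's cascade = dispatch on the classified event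
theorem pvStepA_eq_classify
    (st : List (PySem.Dict String String) × PySem.Dict String String) (raw : String) :
    pvStepA st raw =
      match pvClassify raw with
      | none => st
      | some none => if st.2.items ≠ [] then (st.1 ++ [st.2], PySem.Dict.empty) else st
      | some (some e) =>
        if e.1 = "title" then
          ((if st.2.items ≠ [] then st.1 ++ [st.2] else st.1), pvBuildStep PySem.Dict.empty e)
        else (st.1, st.2.insert e.1 e.2) := by
  by_cases hb : PySem.Str.strip raw = ""
  · simp [pvStepA, pvClassify, hb]
  · unfold pvStepA pvClassify pvFirstMatch pvPrefixes
    by_cases h1 : PySem.Chars.startswith (PySem.Chars.strip raw.toList) ['T','i','t','l','e',':'] = true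
    · simp [hb, h1, pvBuildStep, PySem.Str.len]
    · 
      by_cases h2 : PySem.Chars.startswith (PySem.Chars.strip raw.toList) ['A','u','t','h','o','r','s',':'] = true
      · simp [hb, h1, h2, pvFirstMatch, PySem.Str.len]
      · 
        by_cases h3 : PySem.Chars.startswith (PySem.Chars.strip raw.toList) ['P','u','b','l','i','s','h','e','r',':'] = true
        · simp [hb, h1, h2, h3, pvFirstMatch, PySem.Str.len]
        · 
          by_cases h4 : PySem.Chars.startswith (PySem.Chars.strip raw.toList) ['L','a','n','g','u','a','g','e',':'] = true
          · simp [hb, h1, h2, h3, h4, pvFirstMatch, PySem.Str.len]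
          · 
            by_cases h5 : PySem.Chars.startswith (PySem.Chars.strip raw.toList) ['F','o','r','m','a','t',':'] = true
            · simp [hb, h1, h2, h3, h4, h5, pvFirstMatch, PySem.Str.len]
            · 
              by_cases h6 : PySem.Chars.startswith (PySem.Chars.strip raw.toList) ['S','i','z','e',':'] = true
              · simp [hb, h1, h2, h3, h4, h5, h6, pvFirstMatch, PySem.Str.len]
              · 
                by_cases h7 : PySem.Chars.startswith (PySem.Chars.strip raw.toList) ['U','R','L',':'] = true
                · simp [hb, h1, h2, h3, h4, h5, h6, h7, pvFirstMatch, PySem.Str.len]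
                · 
                  by_cases h8 : PySem.Chars.startswith (PySem.Chars.strip raw.toList) ['H','a','s','h',':'] = true
                  · simp [hb, h1, h2, h3, h4, h5, h6, h7, h8, pvFirstMatch, PySem.Str.len]
                  · simp [hb, h1, h2, h3, h4, h5, h6, h7, h8, pvFirstMatch]

-- events foldl-append accumulator = filterMap
theorem pvEvents_eq (lines : List String) (acc : List (Option (String × String))) :
    (lines.foldl
      (fun acc raw =>
        match pvClassify raw with
        | some ev => acc ++ [ev]
        | none => acc) acc)
      = acc ++ lines.filterMap pvClassify := by
  induction lines generalizing acc with
  | nil => simp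
  | cons l ls ih =>
    cases h : pvClassify l <;> simp [List.foldl_cons, h, ih]

-- main simulation: A's fold over lines = B's grouping fold over the events, through pvBuild
theorem pvMain (lines : List String)
    (st : List (List (String × String)) × List (String × String)) :
    lines.foldl pvStepA (st.1.map pvBuild, pvBuild st.2) =
      (((lines.filterMap pvClassify).foldl pvGroupStep st).1.map pvBuild,
       pvBuild ((lines.filterMap pvClassify).foldl pvGroupStep st).2) := by
  induction lines generalizing st with
  | nil => simp
  | cons l ls ih =>
    simp only [List.foldl_cons, List.filterMap_cons]
    rw [pvStepA_eq_classify]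
    cases h : pvClassify l with
    | none => exact ih st
    | some ev =>
      cases ev with
      | none =>
        have hstep :
            (match (some none : Option (Option (String × String))) with
              | none => (st.1.map pvBuild, pvBuild st.2)
              | some none =>
                if (pvBuild st.2).items ≠ [] then
                  (st.1.map pvBuild ++ [pvBuild st.2], PySem.Dict.empty)
                else (st.1.map pvBuild, pvBuild st.2)
              | some (some e) =>
                if e.1 = "title" then
                  ((if (pvBuild st.2).items ≠ [] then st.1.map pvBuild ++ [pvBuild st.2]
                    else st.1.map pvBuild), pvBuildStep PySem.Dict.empty e)
                else (st.1.map pvBuild, (pvBuild st.2).insert e.1 e.2)) =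
            ((pvGroupStep st none).1.map pvBuild, pvBuild (pvGroupStep st none).2) := by
          unfold pvGroupStep
          by_cases hr : st.2 = []
          · simp [hr, show (pvBuild ([] : List (String × String))).items = [] from rfl]
          · have hne := (pvBuildNonemptyIff st.2).mpr hr
            simp [hr, hne, show pvBuild ([] : List (String × String)) = PySem.Dict.empty from rfl]
        rw [hstep]; exact ih _
      | some e =>
        have hstep :
            (match (some (some e) : Option (Option (String × String))) with
              | none => (st.1.map pvBuild, pvBuild st.2)
              | some none =>
                if (pvBuild st.2).items ≠ [] then
                  (st.1.map pvBuild ++ [pvBuild st.2], PySem.Dict.empty)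
                else (st.1.map pvBuild, pvBuild st.2)
              | some (some e) =>
                if e.1 = "title" then
                  ((if (pvBuild st.2).items ≠ [] then st.1.map pvBuild ++ [pvBuild st.2]
                    else st.1.map pvBuild), pvBuildStep PySem.Dict.empty e)
                else (st.1.map pvBuild, (pvBuild st.2).insert e.1 e.2)) =
            ((pvGroupStep st (some e)).1.map pvBuild, pvBuild (pvGroupStep st (some e)).2) := by
          unfold pvGroupStep
          by_cases ht : e.1 = "title"
          · by_cases hr : st.2 = []
            · simp [ht, hr, show (pvBuild ([] : List (String × String))).items = [] from rfl,
                show pvBuild [e] = pvBuildStep PySem.Dict.empty e from rfl]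
            · have hne := (pvBuildNonemptyIff st.2).mpr hr
              simp [ht, hr, hne, show pvBuild [e] = pvBuildStep PySem.Dict.empty e from rfl]
          · have hbs : pvBuildStep (pvBuild st.2) e = (pvBuild st.2).insert e.1 e.2 := by
              simp [pvBuildStep, ht]
            simp [ht, pvBuildAppend, hbs]
        rw [hstep]; exact ih _

-- ===== VERDICT =====
set_option maxHeartbeats 1000000 in
theorem parse_annas_search_output_py_spec : Claim_equal_parse_annas_search_output_py := by
  intro text _
  show parse_annas_search_output_py text = parse_annas_search_output_py_alt text
  have hev : pvEvents text = (PySem.Str.splitlines (PySem.Str.strip text)).filterMap pvClassify := by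
    unfold pvEvents; rw [pvEvents_eq]; simp
  have h := pvMain (PySem.Str.splitlines (PySem.Str.strip text)) ([], [])
  simp only [List.map_nil] at h
  rw [show pvBuild [] = PySem.Dict.empty from rfl] at h
  unfold parse_annas_search_output_py parse_annas_search_output_py_alt
  simp only [hev, h]
  set g := (((PySem.Str.splitlines (PySem.Str.strip text)).filterMap pvClassify).foldl
    pvGroupStep ([], [])) with hg
  by_cases hr : g.2 = []
  · simp [hr, show (pvBuild ([] : List (String × String))).items = [] from rfl]
  · have hne := (pvBuildNonemptyIff g.2).mpr hr
    simp [hr, hne]
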